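-- pv_equiv track=rewrite | github.com/juntuu/advent_of_code_2018 | day_25/solution.py | join
-- ===== SOURCE A (Python) =====
-- def manhattan(a, b):
-- 	return sum(abs(i - j) for (i, j) in zip(a, b))
--
-- def join(p0, points, distance):
-- 	group = {p0}
-- 	added = {p0}
-- 	checked = set()
-- 	while added:
-- 		p0 = added.pop()
-- 		for p in points:
-- 			if manhattan(p0, p) <= distance:
-- 				added.add(p)
-- 		checked.add(p0)
-- 		added -= checked
-- 		group.update(added)
-- 	return group
-- ===== SOURCE B (Python) =====
-- def manhattan(a, b):
-- 	return sum(abs(i - j) for (i, j) in zip(a, b))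
--
-- def join(p0, points, distance):
-- 	# recursive layered closure: each step collects the whole next layer at once
-- 	def grow(group, frontier):
-- 		layer = {p for q in frontier for p in points
-- 		         if p not in group and manhattan(q, p) <= distance}
-- 		return group if not layer else grow(group | layer, layer)
-- 	return grow({p0}, {p0})
-- ===== Notes on version B (the rewrite author's own statement) =====
-- stated objective: simpler
-- what changed: Replaces A's mutating worklist loop (pop one element, per-pop set subtraction and union over added/checked/group) by a recursive layer-at-a-time closure: each recursive call builds the entire next layer with one set comprehension over frontier x points and recurses on it until the layer is empty; the added/checked bookkeeping and the pop disappear.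
import Mathlib
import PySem

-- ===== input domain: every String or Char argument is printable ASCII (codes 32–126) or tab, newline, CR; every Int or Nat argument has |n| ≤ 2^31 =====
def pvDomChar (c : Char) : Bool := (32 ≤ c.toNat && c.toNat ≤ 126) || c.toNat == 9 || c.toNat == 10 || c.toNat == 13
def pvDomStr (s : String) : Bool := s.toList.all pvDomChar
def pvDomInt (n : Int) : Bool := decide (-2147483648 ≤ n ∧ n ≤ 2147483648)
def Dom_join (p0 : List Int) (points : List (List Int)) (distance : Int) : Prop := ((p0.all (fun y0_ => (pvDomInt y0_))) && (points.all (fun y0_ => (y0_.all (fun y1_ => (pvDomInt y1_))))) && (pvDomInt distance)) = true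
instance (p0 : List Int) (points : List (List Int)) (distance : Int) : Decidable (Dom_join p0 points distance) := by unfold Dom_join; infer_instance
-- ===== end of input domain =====

-- B replaces A's mutating worklist loop (pop one element at a time, with added/checked
-- bookkeeping, a set subtraction and a set union per pop) by a recursive layer-at-a-time
-- closure: each recursive call builds the entire next layer with one set comprehension over
-- frontier × points and recurses on it until the layer is empty (objective: simpler). Python
-- returns a SET, so the result does not depend on the pop/iteration order Python leaves
-- unspecified; both ports realise it as the same discovery-order list (A's set.pop() is
-- modelled as popping the first element in insertion order, B's set comprehension in
-- frontier-then-points order — orders the final set does not depend on).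

-- ===== PORT A =====
def manhattan (a b : List Int) : Int := ((a.zip b).map (fun p => |p.1 - p.2|)).sum

-- the while-loop of A; fuel points.length+1 bounds the iteration count: every iteration moves a
-- new element of the ≤ points.length+1 element universe {p0} ∪ points into `checked`, after
-- which `added` (kept disjoint from `checked`) is empty and the loop stops returning `group`
def joinLoopA (points : List (List Int)) (distance : Int) :
    Nat → PySem.Set (List Int) → PySem.Set (List Int) → PySem.Set (List Int) → PySem.Set (List Int)
  | 0, group, _, _ => group
  | fuel + 1, group, added, checked =>
    match added with
    | [] => group
    | q :: rest =>
      let added1 := points.foldl (fun s p => if manhattan q p ≤ distance then PySem.Set.add s p else s) rest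
      let checked1 := PySem.Set.add checked q
      let added2 := PySem.Set.diff added1 checked1
      let group1 := PySem.Set.update group added2
      joinLoopA points distance fuel group1 added2 checked1

def join (p0 : List Int) (points : List (List Int)) (distance : Int) : List (List Int) :=
  joinLoopA points distance (points.length + 1) [p0] [p0] []

-- ===== PORT B =====
-- the set comprehension of B: the whole next layer, built over frontier × points
def joinLayer (points : List (List Int)) (distance : Int)
    (group : PySem.Set (List Int)) (frontier : List (List Int)) : PySem.Set (List Int) :=
  frontier.foldl (fun layer q =>
    points.foldl (fun layer p =>
      if !(PySem.Set.contains group p) && decide (manhattan q p ≤ distance)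
      then PySem.Set.add layer p else layer) layer) []

-- the recursion of B (`grow`); the fuel argument only makes the recursion structural: it is
-- spent element-by-element (the layers are disjoint sets of points, so points.length suffices
-- at the call site) and the `else group` guard branch is never reached from join_alt
def growB (points : List (List Int)) (distance : Int)
    (fuel : Nat) (group : PySem.Set (List Int)) (frontier : List (List Int)) : List (List Int) :=
  let layer := joinLayer points distance group frontier
  if layer.isEmpty then group
  else if h : layer.length ≤ fuel then
    growB points distance (fuel - layer.length) (PySem.Set.union group layer) layer
  else group
  termination_by fuel
  decreasing_by
    rename_i hne
    have h2 : (joinLayer points distance group frontier).length ≤ fuel := h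
    have h1 : ¬ (joinLayer points distance group frontier).length = 0 := fun h0 =>
      hne (by simp only [List.isEmpty_iff]; exact List.eq_nil_of_length_eq_zero h0)
    omega

def join_alt (p0 : List Int) (points : List (List Int)) (distance : Int) : List (List Int) :=
  growB points distance points.length (PySem.Set.ofList [p0]) [p0]

-- ===== PRECONDITION & SPEC =====
def Spec_join (p0 : List Int) (points : List (List Int)) (distance : Int) (out : List (List Int)) : Prop := out = join_alt p0 points distance
instance (p0 : List Int) (points : List (List Int)) (distance : Int) (out : List (List Int)) : Decidable (Spec_join p0 points distance out) := by unfold Spec_join; infer_instance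

-- ===== CLAIM (what is proved, stated in full; the proofs are below) =====
def Claim_equal_join : Prop := ∀ (p0 : List Int) (points : List (List Int)) (distance : Int), Dom_join p0 points distance → Spec_join p0 points distance (join p0 points distance)

-- ===== LEMMAS AND PROOFS =====

-- proof-only intermediate: a cursor walking the growing group one node at a time
def curL (points : List (List Int)) (distance : Int) :
    Nat → List (List Int) → Nat → List (List Int)
  | 0, g, _ => g
  | f + 1, g, i =>
    if i < g.length then
      curL points distance f
        (PySem.Set.update g (points.filter (fun p => decide (manhattan (g.getD i []) p ≤ distance))))
        (i + 1)
    else g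

-- proof-only: joinLayer with an arbitrary starting layer
def layerFrom (points : List (List Int)) (distance : Int)
    (group : PySem.Set (List Int)) (L : PySem.Set (List Int)) (frontier : List (List Int)) :
    PySem.Set (List Int) :=
  frontier.foldl (fun layer q =>
    points.foldl (fun layer p =>
      if !(PySem.Set.contains group p) && decide (manhattan q p ≤ distance)
      then PySem.Set.add layer p else layer) layer) L

theorem joinLayer_eq_layerFrom (points : List (List Int)) (distance : Int)
    (group : PySem.Set (List Int)) (frontier : List (List Int)) :
    joinLayer points distance group frontier = layerFrom points distance group [] frontier := rfl

theorem growB_unfold (points : List (List Int)) (distance : Int)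
    (fuel : Nat) (group : PySem.Set (List Int)) (frontier : List (List Int)) :
    growB points distance fuel group frontier =
      if (joinLayer points distance group frontier).isEmpty then group
      else if (joinLayer points distance group frontier).length ≤ fuel then
        growB points distance (fuel - (joinLayer points distance group frontier).length)
          (PySem.Set.union group (joinLayer points distance group frontier))
          (joinLayer points distance group frontier)
      else group := by
  conv_lhs => rw [growB]
  split <;> rename_i hh
  · simp [hh]
  · by_cases hl : (joinLayer points distance group frontier).length ≤ fuel <;>
      simp [hh, hl]

-- A's inner for-loop is Set.update with the filtered neighbour list
theorem foldl_add_if {α : Type} [BEq α] (c : α → Prop) [DecidablePred c] :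
    ∀ (l : List α) (s : PySem.Set α),
      l.foldl (fun s p => if c p then PySem.Set.add s p else s) s
        = PySem.Set.update s (l.filter (fun p => decide (c p))) := by
  intro l
  induction l with
  | nil => intro s; rfl
  | cons x xs ih =>
    intro s
    by_cases h : c x <;> simp [h, PySem.Set.update, ih]

-- updating a set with elements already present is the identity
theorem update_of_forall_mem {α : Type} [BEq α] [LawfulBEq α] :
    ∀ (l : List α) (s : PySem.Set α), (∀ x ∈ l, x ∈ s) → PySem.Set.update s l = s := by
  intro l
  induction l with
  | nil => intro s _; rfl
  | cons x xs ih =>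
    intro s h
    rw [PySem.Set.update_cons, PySem.Set.add_of_mem (h x (by simp))]
    exact ih s (fun y hy => h y (by simp [hy]))

-- A's loop from a cursor state: added = group.drop i, checked = group.take i
theorem loopA_eq_curL (points : List (List Int)) (distance : Int) :
    ∀ (fuel : Nat) (group : List (List Int)) (i : Nat), group.Nodup →
      joinLoopA points distance fuel group (group.drop i) (group.take i)
        = curL points distance fuel group i := by
  intro fuel
  induction fuel with
  | zero => intro group i _; rfl
  | succ f ih =>
    intro group i hnd
    by_cases h : i < group.length
    · have hdrop : group.drop i = group[i] :: group.drop (i + 1) := List.drop_eq_getElem_cons h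
      have htake1 : group.take (i + 1) = group.take i ++ [group[i]] := List.take_succ_eq_append_getElem h
      have hsplit : (group.take i ++ [group[i]]) ++ group.drop (i + 1) = group := by
        rw [← htake1]; exact List.take_append_drop (i + 1) group
      have hnd' : ((group.take i ++ [group[i]]) ++ group.drop (i + 1)).Nodup := by
        rw [hsplit]; exact hnd
      obtain ⟨hnd1, hndrest, hdisj⟩ := List.nodup_append.mp hnd'
      have hqtk : group[i] ∉ group.take i := by
        rcases List.nodup_append.mp hnd1 with ⟨-, -, hd⟩
        intro hmem; exact hd _ hmem _ (by simp) rfl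
      set q := group[i] with hq
      set nb := points.filter (fun p => decide (manhattan q p ≤ distance)) with hnb
      set new := (PySem.Set.ofList nb).filter (fun y => !(PySem.Set.contains group y)) with hnew
      have hnewnodup : new.Nodup := (PySem.Set.nodup_ofList nb).filter _
      have hnewnotin : ∀ x ∈ new, x ∉ group := by
        intro x hx
        have := (List.mem_filter.mp hx).2
        simpa using this
      have hadded2 :
          PySem.Set.diff (PySem.Set.update (group.drop (i + 1)) nb) (group.take i ++ [q])
            = group.drop (i + 1) ++ new := by
        rw [PySem.Set.update_eq_append_filter]
        simp only [PySem.Set.diff, List.filter_append]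
        congr 1
        · apply List.filter_eq_self.mpr
          intro x hx
          simp only [Bool.not_eq_true', PySem.Set.contains_eq_listContains]
          simp only [List.contains_eq_mem, decide_eq_false_iff_not, List.mem_append,
            List.mem_singleton, not_or]
          exact ⟨fun hm => hdisj _ (by simp [hm]) _ hx rfl,
                 fun he => (List.nodup_append.mp hnd').2.2 _ (by simp) _ hx he.symm⟩
        · rw [List.filter_filter]
          apply List.filter_congr
          intro x hx
          have hmem : x ∈ group ↔ x ∈ group.take i ++ [q] ∨ x ∈ group.drop (i + 1) := by
            conv_lhs => rw [← hsplit]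
            exact List.mem_append
          by_cases h1 : x ∈ group.take i ++ [q] <;> by_cases h2 : x ∈ group.drop (i + 1) <;>
            simp [PySem.Set.contains, h1, h2, hmem]
      have hgroup1 : PySem.Set.update group (group.drop (i + 1) ++ new) = group ++ new := by
        rw [PySem.Set.update_append,
          update_of_forall_mem _ _ (fun x hx => List.mem_of_mem_drop hx)]
        exact PySem.Set.update_eq_append_of_disjoint group new hnewnodup hnewnotin
      have hupd : PySem.Set.update group nb = group ++ new := by
        rw [PySem.Set.update_eq_append_filter]
      have hndg : (group ++ new).Nodup :=
        hnd.append hnewnodup (fun x hx hx' => (hnewnotin x hx') hx)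
      have hlen : i + 1 ≤ group.length := h
      have hIH := ih (group ++ new) (i + 1) hndg
      rw [List.drop_append_of_le_length hlen, List.take_append_of_le_length hlen] at hIH
      rw [hdrop]
      show joinLoopA points distance f
          (PySem.Set.update group
            (PySem.Set.diff
              (points.foldl (fun s p => if manhattan q p ≤ distance then PySem.Set.add s p else s)
                (group.drop (i + 1)))
              (PySem.Set.add (group.take i) q)))
          (PySem.Set.diff
            (points.foldl (fun s p => if manhattan q p ≤ distance then PySem.Set.add s p else s)
              (group.drop (i + 1)))
            (PySem.Set.add (group.take i) q))
          (PySem.Set.add (group.take i) q)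
        = curL points distance (f + 1) group i
      rw [foldl_add_if (fun p => manhattan q p ≤ distance), ← hnb,
        PySem.Set.add_of_not_mem hqtk, hadded2, hgroup1]
      rw [← htake1, hIH]
      conv_rhs => rw [show curL points distance (f + 1) group i
        = if i < group.length then
            curL points distance f
              (PySem.Set.update group (points.filter (fun p => decide (manhattan (group.getD i []) p ≤ distance))))
              (i + 1)
          else group from rfl]
      rw [if_pos h, List.getD_eq_getElem group [] h, ← hq, ← hnb, hupd]
    · have hd : group.drop i = [] := List.drop_eq_nil_of_le (by omega)
      simp [joinLoopA, curL, hd, h]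

-- appending a fresh element behind a fixed prefix commutes with Set.add
theorem add_append {α : Type} [BEq α] [LawfulBEq α] (G L : List α) (p : α) (hp : p ∉ G) :
    PySem.Set.add (G ++ L) p = G ++ PySem.Set.add L p := by
  by_cases hL : p ∈ L
  · rw [PySem.Set.add_of_mem (by simp [hL]), PySem.Set.add_of_mem hL]
  · rw [PySem.Set.add_of_not_mem (by simp [hp, hL]), PySem.Set.add_of_not_mem hL,
      List.append_assoc]

-- one cursor step (filter-then-update) equals B's inner points-scan with the group fixed
theorem step_eq (distance : Int) (G : List (List Int)) (q : List Int) :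
    ∀ (pts L : List (List Int)),
      PySem.Set.update (G ++ L) (pts.filter (fun p => decide (manhattan q p ≤ distance)))
        = G ++ pts.foldl (fun layer p =>
            if !(PySem.Set.contains G p) && decide (manhattan q p ≤ distance)
            then PySem.Set.add layer p else layer) L := by
  intro pts
  induction pts with
  | nil => intro L; rfl
  | cons p ps ih =>
    intro L
    rw [List.foldl_cons]
    show PySem.Set.update (G ++ L) ((p :: ps).filter (fun p => decide (manhattan q p ≤ distance)))
      = G ++ ps.foldl (fun layer p =>
          if !(PySem.Set.contains G p) && decide (manhattan q p ≤ distance)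
          then PySem.Set.add layer p else layer)
          (if !(PySem.Set.contains G p) && decide (manhattan q p ≤ distance)
           then PySem.Set.add L p else L)
    by_cases hc : manhattan q p ≤ distance
    · by_cases hG : p ∈ G
      · rw [List.filter_cons_of_pos (by simpa using hc), PySem.Set.update_cons,
          PySem.Set.add_of_mem (List.mem_append.mpr (Or.inl hG)),
          if_neg (by simp [hG])]
        exact ih L
      · rw [List.filter_cons_of_pos (by simpa using hc), PySem.Set.update_cons,
          add_append G L p hG, if_pos (by simp [hG, hc])]
        exact ih (PySem.Set.add L p)
    · rw [List.filter_cons_of_neg (by simpa using hc), if_neg (by simp [hc])]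
      exact ih L

-- the layer fold only adds fresh points: nodup, from points, disjoint from the group
theorem layerFrom_inv (points : List (List Int)) (distance : Int) (G : List (List Int)) :
    ∀ (fr L : List (List Int)), L.Nodup → (∀ x ∈ L, x ∈ points ∧ x ∉ G) →
      (layerFrom points distance G L fr).Nodup ∧
        ∀ x ∈ layerFrom points distance G L fr, x ∈ points ∧ x ∉ G := by
  have inner : ∀ (ps L : List (List Int)) (q : List Int), L.Nodup →
      (∀ x ∈ L, x ∈ points ∧ x ∉ G) → (∀ x ∈ ps, x ∈ points) →
      (ps.foldl (fun layer p =>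
          if !(PySem.Set.contains G p) && decide (manhattan q p ≤ distance)
          then PySem.Set.add layer p else layer) L).Nodup ∧
        ∀ x ∈ ps.foldl (fun layer p =>
          if !(PySem.Set.contains G p) && decide (manhattan q p ≤ distance)
          then PySem.Set.add layer p else layer) L, x ∈ points ∧ x ∉ G := by
    intro ps
    induction ps with
    | nil => intro L q h1 h2 _; exact ⟨h1, h2⟩
    | cons p ps ih =>
      intro L q h1 h2 hps
      simp only [List.foldl_cons]
      by_cases hcond : (!(PySem.Set.contains G p) && decide (manhattan q p ≤ distance)) = true
      · rw [if_pos hcond]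
        have hpG : p ∉ G := by
          intro hmem
          simp [PySem.Set.contains_eq_listContains, List.contains_eq_mem, hmem] at hcond
        refine ih (PySem.Set.add L p) q (PySem.Set.nodup_add L p h1) ?_
          (fun x hx => hps x (by simp [hx]))
        intro x hx
        rcases (PySem.Set.mem_add L p x).mp hx with hx' | hx'
        · exact h2 x hx'
        · cases hx'
          exact ⟨hps _ (by simp), hpG⟩
      · rw [if_neg hcond]
        exact ih L q h1 h2 (fun x hx => hps x (by simp [hx]))
  intro fr
  induction fr with
  | nil => intro L h1 h2; exact ⟨h1, h2⟩
  | cons q fr ih =>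
    intro L h1 h2
    have h := inner points L q h1 h2 (fun x hx => hx)
    exact ih _ h.1 h.2

-- walking the frontier with the cursor accumulates exactly the layer fold
theorem curL_layer (points : List (List Int)) (distance : Int) :
    ∀ (fr G L : List (List Int)) (i φ : Nat),
      i + fr.length = G.length → G.drop i = fr →
      curL points distance (fr.length + φ) (G ++ L) i
        = curL points distance φ (G ++ layerFrom points distance G L fr) G.length := by
  intro fr
  induction fr with
  | nil =>
    intro G L i φ hlen hdrop
    have hi : i = G.length := by simpa using hlen
    subst hi
    simp only [List.length_nil, Nat.zero_add]
    rfl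
  | cons q fr ih =>
    intro G L i φ hlen hdrop
    have hi : i < G.length := by simp only [List.length_cons] at hlen; omega
    have h12 : q :: fr = G[i] :: G.drop (i + 1) :=
      hdrop.symm.trans (List.drop_eq_getElem_cons hi)
    injection h12 with ha hb
    have hfuel : (q :: fr).length + φ = (fr.length + φ) + 1 := by
      simp only [List.length_cons]; omega
    rw [hfuel]
    have hlt : i < (G ++ L).length := by simp only [List.length_append]; omega
    rw [show curL points distance ((fr.length + φ) + 1) (G ++ L) i
      = if i < (G ++ L).length then
          curL points distance (fr.length + φ)
            (PySem.Set.update (G ++ L)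
              (points.filter (fun p => decide (manhattan ((G ++ L).getD i []) p ≤ distance))))
            (i + 1)
        else (G ++ L) from rfl]
    rw [if_pos hlt]
    have hgd : (G ++ L).getD i [] = q := by
      rw [List.getD_eq_getElem _ [] hlt]
      simp only [List.getElem_append, hi, dif_pos]
      exact ha.symm
    rw [hgd, step_eq distance G q points L]
    have hlen2 : (i + 1) + fr.length = G.length := by
      simp only [List.length_cons] at hlen; omega
    rw [ih G _ (i + 1) φ hlen2 hb.symm]
    rfl

-- a cursor at or past the end of the group returns it
theorem curL_done (points : List (List Int)) (distance : Int) (f : Nat)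
    (g : List (List Int)) (i : Nat) (h : g.length ≤ i) :
    curL points distance f g i = g := by
  cases f with
  | zero => rfl
  | succ f => simp [curL, Nat.not_lt.mpr h]

-- counting: a fresh nodup layer uses up that much of the budget of distinct new points
theorem count_step (points G L : List (List Int)) (hL : L.Nodup)
    (h : ∀ x ∈ L, x ∈ points ∧ x ∉ G) :
    (points.filter (fun p => !((G ++ L).contains p))).dedup.length + L.length
      ≤ (points.filter (fun p => !(G.contains p))).dedup.length := by
  classical
  have hA : (points.filter (fun p => !(G.contains p))).dedup.length
      = ((points.filter (fun p => !(G.contains p))).toFinset).card := by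
    rw [List.card_toFinset]
  have hB : (points.filter (fun p => !((G ++ L).contains p))).dedup.length
      = ((points.filter (fun p => !((G ++ L).contains p))).toFinset).card := by
    rw [List.card_toFinset]
  rw [hA, hB]
  set A := (points.filter (fun p => !(G.contains p))).toFinset with hAdef
  set B := (points.filter (fun p => !((G ++ L).contains p))).toFinset with hBdef
  have hsub : L.toFinset ⊆ A := by
    intro x hx
    rw [List.mem_toFinset] at hx
    rw [hAdef, List.mem_toFinset, List.mem_filter]
    exact ⟨(h x hx).1, by simpa using (h x hx).2⟩
  have hBeq : B = A \ L.toFinset := by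
    ext x
    simp only [hBdef, hAdef, List.mem_toFinset, List.mem_filter, Finset.mem_sdiff,
      List.contains_eq_mem, List.mem_append, Bool.not_eq_true', decide_eq_false_iff_not, not_or]
    tauto
  have hcard : B.card = A.card - L.toFinset.card := by
    rw [hBeq, Finset.card_sdiff, Finset.inter_eq_left.mpr hsub]
  have hLcard : L.toFinset.card = L.length := List.toFinset_card_of_nodup hL
  have hle : L.toFinset.card ≤ A.card := Finset.card_le_card hsub
  omega

-- main correspondence: the cursor with per-node fuel equals B's per-layer recursion
theorem curL_growB (points : List (List Int)) (distance : Int) :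
    ∀ (φ : Nat) (G fr : List (List Int)) (i : Nat), G.Nodup →
      i + fr.length = G.length → G.drop i = fr →
      (points.filter (fun p => !(G.contains p))).dedup.length ≤ φ →
      curL points distance (fr.length + φ) G i = growB points distance φ G fr := by
  intro φ
  induction φ using Nat.strong_induction_on with
  | _ φ ih =>
    intro G fr i hnd hlen hdrop hφ
    have hlayer := curL_layer points distance fr G [] i φ hlen hdrop
    rw [List.append_nil] at hlayer
    set layer := layerFrom points distance G [] fr with hlayerdef
    have hjl : joinLayer points distance G fr = layer :=
      (joinLayer_eq_layerFrom points distance G fr).trans hlayerdef.symm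
    have hinv := layerFrom_inv points distance G fr [] List.nodup_nil (by simp)
    rw [← hlayerdef] at hinv
    rw [hlayer, growB_unfold, hjl]
    by_cases hemp : layer = []
    · rw [hemp]
      simp only [List.isEmpty_nil, if_true, List.append_nil]
      exact curL_done points distance φ G G.length (le_refl _)
    · have hcount := count_step points G layer hinv.1 hinv.2
      have hlay_le : layer.length ≤ φ := by omega
      have hne1 : 1 ≤ layer.length := by
        cases hlv : layer with
        | nil => exact absurd hlv hemp
        | cons a l => simp
      have hneB : ¬ (layer.isEmpty = true) := by simpa [List.isEmpty_iff] using hemp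
      rw [if_neg hneB, if_pos hlay_le]
      have hunion : PySem.Set.union G layer = G ++ layer :=
        PySem.Set.update_eq_append_of_disjoint G layer hinv.1 (fun x hx => (hinv.2 x hx).2)
      rw [hunion]
      have hnd' : (G ++ layer).Nodup :=
        hnd.append hinv.1 (fun x hx hx' => (hinv.2 x hx').2 hx)
      have hIH := ih (φ - layer.length) (by omega) (G ++ layer) layer G.length hnd'
        (by simp) (by rw [List.drop_left]) (by omega)
      have hfe : layer.length + (φ - layer.length) = φ := by omega
      rw [hfe] at hIH
      exact hIH

-- the distinct points outside {p0} are at most points.length many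
theorem count_top (p0 : List Int) (points : List (List Int)) :
    (points.filter (fun p => !([p0].contains p))).dedup.length ≤ points.length := by
  classical
  have h1 : (points.filter (fun p => !([p0].contains p))).dedup.length
      = ((points.filter (fun p => !([p0].contains p))).toFinset).card := by
    rw [List.card_toFinset]
  have h2 : ((points.filter (fun p => !([p0].contains p))).toFinset).card
      ≤ points.toFinset.card := by
    apply Finset.card_le_card
    intro x hx
    rw [List.mem_toFinset] at hx ⊢
    exact (List.mem_filter.mp hx).1
  have h3 : points.toFinset.card = points.dedup.length := List.card_toFinset points
  have h4 : points.dedup.length ≤ points.length := (List.dedup_sublist points).length_le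
  omega

-- ===== VERDICT (by name: the statement is the Claim_ definition above) =====
theorem join_spec : Claim_equal_join := by
  intro p0 points distance _
  unfold Spec_join join join_alt
  have h1 := loopA_eq_curL points distance (points.length + 1) [p0] 0 (by simp)
  simp only [List.drop_zero, List.take_zero] at h1
  rw [h1]
  have h2 := curL_growB points distance points.length [p0] [p0] 0 (by simp)
    (by simp) (by simp) (count_top p0 points)
  rw [show points.length + 1 = [p0].length + points.length by
    simp only [List.length_cons, List.length_nil]; omega]
  rw [h2]
  rfl
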